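-- pv_equiv track=rewrite | github.com/davidjurgens/potato | potato/server_utils/displays/dialogue_display.py | _get_speaker_index
-- ===== SOURCE A (Python) =====
-- from typing import Dict, Any, List, Union
--
-- def _get_speaker_index(speaker: str, turns: List[Dict[str, str]]) -> int:
--     """
--     Get a consistent index for a speaker for styling purposes.
--
--     Args:
--         speaker: The speaker name
--         turns: All turns in the dialogue
--
--     Returns:
--         Integer index for the speaker (0, 1, 2, ...)
--     """
--     if not speaker:
--         return 0
--
--     # Get unique speakers in order of first appearance
--     seen_speakers = []
--     for turn in turns:
--         s = turn.get("speaker", "")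
--         if s and s not in seen_speakers:
--             seen_speakers.append(s)
--
--     try:
--         return seen_speakers.index(speaker)
--     except ValueError:
--         return 0
-- ===== SOURCE B (Python) =====
-- def _get_speaker_index(speaker, turns):
--     if not speaker:
--         return 0
--     seen = set()
--     for turn in turns:
--         s = turn.get("speaker", "")
--         if s == speaker:
--             return len(seen)
--         if s:
--             seen.add(s)
--     return 0
-- ===== Notes on version B (the rewrite author's own statement) =====
-- stated objective: simpler
-- what changed: Instead of building the complete ordered list of unique speakers and then calling .index with try/except, B makes a single pass that returns the count of distinct earlier speakers at the target's first occurrence, never building the full list and replacing the quadratic 's not in seen_speakers' list scan with a set.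
import Mathlib
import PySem

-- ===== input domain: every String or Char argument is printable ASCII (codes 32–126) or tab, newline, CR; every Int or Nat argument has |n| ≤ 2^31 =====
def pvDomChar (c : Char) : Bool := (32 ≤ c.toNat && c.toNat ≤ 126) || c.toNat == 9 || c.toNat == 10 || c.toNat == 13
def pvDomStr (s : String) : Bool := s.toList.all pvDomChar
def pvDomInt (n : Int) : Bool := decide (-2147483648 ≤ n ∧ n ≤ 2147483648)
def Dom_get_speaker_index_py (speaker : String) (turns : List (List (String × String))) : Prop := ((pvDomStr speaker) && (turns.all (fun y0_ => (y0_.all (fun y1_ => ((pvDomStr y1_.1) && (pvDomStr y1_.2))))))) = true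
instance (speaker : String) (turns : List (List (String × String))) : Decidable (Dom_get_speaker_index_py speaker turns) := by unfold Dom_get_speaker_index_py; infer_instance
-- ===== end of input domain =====

-- B builds no full speaker list: one pass with a set of distinct earlier speakers,
-- returning its size at the target's first occurrence (simpler; return value only).

-- ===== PORT A =====
def get_speaker_index_py (speaker : String) (turns : List (List (String × String))) : Int :=
  if speaker = "" then 0
  else
    let seen_speakers := turns.foldl (fun seen turn =>
      let s := PySem.Dict.getD (PySem.Dict.mk turn) "speaker" ""
      if s ≠ "" ∧ s ∉ seen then seen ++ [s] else seen) []
    match PySem.List.index? seen_speakers speaker with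
    | some i => (i : Int)
    | none => 0

-- ===== PORT B =====
def get_speaker_index_py_altLoop (speaker : String) (seen : PySem.Set String) :
    List (List (String × String)) → Int
  | [] => 0
  | turn :: rest =>
    let s := PySem.Dict.getD (PySem.Dict.mk turn) "speaker" ""
    if s = speaker then PySem.Set.len seen
    else if s ≠ "" then get_speaker_index_py_altLoop speaker (PySem.Set.add seen s) rest
    else get_speaker_index_py_altLoop speaker seen rest

def get_speaker_index_py_alt (speaker : String) (turns : List (List (String × String))) : Int :=
  if speaker = "" then 0
  else get_speaker_index_py_altLoop speaker PySem.Set.empty turns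

-- ===== PRECONDITION & SPEC =====
def Spec_get_speaker_index_py (speaker : String) (turns : List (List (String × String))) (out : Int) : Prop := out = get_speaker_index_py_alt speaker turns
instance (speaker : String) (turns : List (List (String × String))) (out : Int) : Decidable (Spec_get_speaker_index_py speaker turns out) := by unfold Spec_get_speaker_index_py; infer_instance

-- ===== CLAIM (what is proved, stated in full; the proofs are below) =====
def Claim_equal_get_speaker_index_py : Prop := ∀ (speaker : String) (turns : List (List (String × String))), Dom_get_speaker_index_py speaker turns → Spec_get_speaker_index_py speaker turns (get_speaker_index_py speaker turns)

-- ===== LEMMAS AND PROOFS =====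

-- A's loop only appends to the accumulator.
theorem aLoop_prefix (ts : List (List (String × String))) (seen : List String) :
    ∃ t, ts.foldl (fun seen turn =>
      let s := PySem.Dict.getD (PySem.Dict.mk turn) "speaker" ""
      if s ≠ "" ∧ s ∉ seen then seen ++ [s] else seen) seen = seen ++ t := by
  induction ts generalizing seen with
  | nil => exact ⟨[], by simp⟩
  | cons turn rest ih =>
    simp only [List.foldl_cons]
    split
    · obtain ⟨t, ht⟩ := ih (seen ++ [PySem.Dict.getD (PySem.Dict.mk turn) "speaker" ""])
      exact ⟨[PySem.Dict.getD (PySem.Dict.mk turn) "speaker" ""] ++ t,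
        by rw [ht, List.append_assoc]⟩
    · exact ih seen

-- Core invariant: with speaker ≠ "" and speaker ∉ seen, B's loop computes the
-- index of speaker in A's final list (0 if absent).
theorem loop_agree (speaker : String) (hsp : speaker ≠ "")
    (ts : List (List (String × String))) :
    ∀ (seen : List String), speaker ∉ seen →
    get_speaker_index_py_altLoop speaker seen ts =
      (match PySem.List.index? (ts.foldl (fun seen turn =>
          let s := PySem.Dict.getD (PySem.Dict.mk turn) "speaker" ""
          if s ≠ "" ∧ s ∉ seen then seen ++ [s] else seen) seen) speaker with
        | some i => (i : Int)
        | none => 0) := by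
  induction ts with
  | nil =>
    intro seen hmem
    have h0 : List.idxOf? speaker seen = none := by
      have := (PySem.List.index?_eq_none_iff seen speaker).mpr hmem
      simpa [PySem.List.index?_eq_idxOf?] using this
    simp [get_speaker_index_py_altLoop, h0]
  | cons turn rest ih =>
    intro seen hmem
    simp only [get_speaker_index_py_altLoop, List.foldl_cons]
    by_cases hs : PySem.Dict.getD (PySem.Dict.mk turn) "speaker" "" = speaker
    · -- B returns |seen|; A appends speaker and its index stays |seen|.
      rw [hs]
      have hcond : speaker ≠ "" ∧ speaker ∉ seen := ⟨hsp, hmem⟩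
      rw [if_pos rfl, if_pos hcond]
      obtain ⟨t, ht⟩ := aLoop_prefix rest (seen ++ [speaker])
      rw [ht, PySem.List.index?_append_of_mem t (by simp : speaker ∈ seen ++ [speaker]),
        PySem.List.index?_append_singleton_self seen speaker hmem]
      simp [PySem.Set.len]
    · rw [if_neg hs]
      by_cases he : PySem.Dict.getD (PySem.Dict.mk turn) "speaker" "" = ""
      · rw [if_neg (by simpa using he), if_neg (by simp [he])]
        exact ih seen hmem
      · rw [if_pos (by simpa using he)]
        by_cases hin : PySem.Dict.getD (PySem.Dict.mk turn) "speaker" "" ∈ seen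
        · have hadd : PySem.Set.add seen (PySem.Dict.getD (PySem.Dict.mk turn) "speaker" "") = seen := by
            simp [PySem.Set.add, PySem.Set.contains, hin]
          rw [hadd, if_neg (by simp [hin])]
          exact ih seen hmem
        · have hadd : PySem.Set.add seen (PySem.Dict.getD (PySem.Dict.mk turn) "speaker" "")
              = seen ++ [PySem.Dict.getD (PySem.Dict.mk turn) "speaker" ""] := by
            simp [PySem.Set.add, PySem.Set.contains, hin]
          rw [hadd, if_pos ⟨he, hin⟩]
          refine ih _ ?_
          simp only [List.mem_append, List.mem_singleton]
          rintro (h | h)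
          · exact hmem h
          · exact hs h.symm

-- ===== VERDICT (by name: the statement is the Claim_ definition above) =====
theorem get_speaker_index_py_spec : Claim_equal_get_speaker_index_py := by
  intro speaker turns _
  unfold Spec_get_speaker_index_py get_speaker_index_py get_speaker_index_py_alt
  by_cases h : speaker = ""
  · simp [h]
  · rw [if_neg h, if_neg h]
    exact (loop_agree speaker h turns [] (by simp)).symm
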